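-- pv_equiv track=rewrite | github.com/MaXin-noob/principles-of-Computer | Eight-bit forward carry adder/main.py | original_code_2_complement
-- ===== SOURCE A (Python) =====
-- def original_code_2_complement(str_bin: str) -> str:
--     """
--     原码转补码
--     :param str_bin:原码
--     :return:补码
--     """
--     str_new = ""
--     flag = True
--     if str_bin[0] == "0":
--         complement = str_bin
--     else:
--         for i in str_bin[1:]:
--             if i == "0":
--                 str_new += "1"
--             else:
--                 str_new += "0"
--         str_flash = '1' + str_new  # 反码
--         i = len(str_flash) - 1
--         while (flag):
--             if (str_flash[i] == '1'):
--                 i -= 1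
--             elif (str_flash[i] == '0'):
--                 flag = False
--         complement = str_flash[0:i] + '1' + (len(str_flash) - i - 1) * '0'
--     return complement
-- ===== SOURCE B (Python) =====
-- def original_code_2_complement(str_bin: str) -> str:
--     """原码转补码 — arithmetic reformulation: read the magnitude as an integer,
--     then render 2**n - value in binary, instead of per-bit inversion and a
--     carry scan."""
--     if str_bin[0] == "0":
--         return str_bin
--     n = len(str_bin) - 1
--     bits = "".join("0" if c == "0" else "1" for c in str_bin[1:])
--     val = int(bits, 2) if bits else 0
--     return "1" + format((1 << n) - val, "0{}b".format(n))
-- ===== Notes on version B (the rewrite author's own statement) =====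
-- stated objective: alternative
-- what changed: Replaces A's per-bit string inversion plus rightmost-zero carry scan and splice by integer arithmetic: read the magnitude as an integer value, then render 2^n - value as an n-digit binary string.
import Mathlib
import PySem

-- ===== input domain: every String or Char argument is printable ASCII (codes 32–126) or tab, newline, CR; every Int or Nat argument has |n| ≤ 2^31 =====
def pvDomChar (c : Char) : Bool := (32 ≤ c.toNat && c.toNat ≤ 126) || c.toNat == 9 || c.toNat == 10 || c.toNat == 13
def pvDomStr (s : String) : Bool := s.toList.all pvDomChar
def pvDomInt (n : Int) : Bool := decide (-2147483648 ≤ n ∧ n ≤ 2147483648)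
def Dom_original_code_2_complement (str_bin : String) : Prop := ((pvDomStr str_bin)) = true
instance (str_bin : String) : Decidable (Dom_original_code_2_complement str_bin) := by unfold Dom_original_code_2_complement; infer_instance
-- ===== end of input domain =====

-- B replaces A's per-bit inversion and rightmost-zero carry scan by integer arithmetic
-- (magnitude value, then the binary digits of 2^n - value); alternative, not claimed faster.

-- ===== PORT A =====
-- the for-loop building str_new: '0' ↦ '1', any other char ↦ '0', in order
def pvInv : List Char → List Char
  | [] => []
  | c :: cs => (if c = '0' then '1' else '0') :: pvInv cs

-- the while-loop: scan down from index i for the first non-'1'; Python would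
-- continue into negative indices (ending in IndexError) when all chars are '1' —
-- that case is excluded by Pre_, here the scan just stops at 0.
def pvScan (flash : List Char) : Nat → Nat
  | 0 => 0
  | i+1 => if flash.getD (i+1) '0' = '1' then pvScan flash i else i+1

def original_code_2_complement (str_bin : String) : String :=
  match str_bin.toList with
  | [] => ""   -- Python: str_bin[0] raises IndexError; excluded by Pre_
  | c :: rest =>
    if c = '0' then str_bin
    else
      let flash := '1' :: pvInv rest            -- 反码
      let i := pvScan flash (flash.length - 1)
      String.mk (flash.take i ++ '1' :: List.replicate (flash.length - i - 1) '0')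

-- ===== PORT B =====
-- minimal binary digits of x, MSB first ([] for x = 0); used to port format(x, 'b')
def pvBin : Nat → List Char
  | 0 => []
  | x + 1 => pvBin ((x + 1) / 2) ++ [if (x + 1) % 2 = 1 then '1' else '0']
decreasing_by omega

-- format(x, '0{n}b'): the binary digits of x ('0' for x = 0) left-padded with '0' to width n; exact hand port
def pvFormatBin (n x : Nat) : List Char :=
  let d := if x = 0 then ['0'] else pvBin x
  List.replicate (n - d.length) '0' ++ d

def original_code_2_complement_alt (str_bin : String) : String :=
  match str_bin.toList with
  | [] => ""   -- Python: str_bin[0] raises IndexError; excluded by Pre_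
  | c :: rest =>
    if c = '0' then str_bin
    else
      let n := rest.length
      let bits := rest.map (fun c => if c = '0' then '0' else '1')
      -- int(bits, 2): fold over the binary digits (Python raises ValueError on empty bits; excluded by Pre_)
      let val := bits.foldl (fun v c => 2 * v + (if c = '1' then 1 else 0)) 0
      -- (1 << n) - val: val < 2^n, so Nat subtraction agrees with Python's int subtraction
      String.mk ('1' :: pvFormatBin n (2 ^ n - val))

-- ===== PRECONDITION & SPEC =====
-- Pre_ excludes exactly the inputs where A raises IndexError: the empty string, and a
-- string whose first character is not the zero digit while every later character is the
-- zero digit (the carry scan then runs off the left end).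
def Pre_original_code_2_complement (str_bin : String) : Prop :=
  str_bin.toList ≠ [] ∧
    (str_bin.toList.headD ' ' = '0' ∨ str_bin.toList.tail.any (fun c => c ≠ '0') = true)
instance (str_bin : String) : Decidable (Pre_original_code_2_complement str_bin) := by
  unfold Pre_original_code_2_complement; infer_instance
def pvWitness_original_code_2_complement : String := "101"

def Spec_original_code_2_complement (str_bin : String) (out : String) : Prop := out = original_code_2_complement_alt str_bin
instance (str_bin : String) (out : String) : Decidable (Spec_original_code_2_complement str_bin out) := by unfold Spec_original_code_2_complement; infer_instance

-- ===== CLAIM (what is proved, stated in full; the proofs are below) =====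
def Claim_equal_original_code_2_complement : Prop := ∀ (str_bin : String), Dom_original_code_2_complement str_bin → Pre_original_code_2_complement str_bin → Spec_original_code_2_complement str_bin (original_code_2_complement str_bin)

-- ===== LEMMAS AND PROOFS =====

-- numeric value of a char list read as binary, any non-'0' char counting as 1
def bval (l : List Char) : Nat := l.foldl (fun v c => 2 * v + (if c ≠ '0' then 1 else 0)) 0

theorem foldl_bval (l : List Char) (a : Nat) :
    l.foldl (fun v c => 2 * v + (if c ≠ '0' then 1 else 0)) a = a * 2 ^ l.length + bval l := by
  
  induction l generalizing a with
  | nil => simp [bval]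
  | cons c t ih =>
    have hb : bval (c :: t) = List.foldl (fun v c => 2 * v + (if c ≠ '0' then 1 else 0)) (2 * 0 + (if c ≠ '0' then 1 else 0)) t := rfl
    rw [List.foldl_cons, ih, hb, ih]
    simp only [List.length_cons, pow_succ]
    ring

theorem bval_cons (c : Char) (l : List Char) :
    bval (c :: l) = (if c ≠ '0' then 1 else 0) * 2 ^ l.length + bval l := by
  
  have hb : bval (c :: l) = List.foldl (fun v c => 2 * v + (if c ≠ '0' then 1 else 0)) (2 * 0 + (if c ≠ '0' then 1 else 0)) l := rfl
  rw [hb, foldl_bval]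
  ring

theorem bval_lt (l : List Char) : bval l < 2 ^ l.length := by
  
  induction l with
  | nil => simp [bval]
  | cons c t ih =>
    rw [bval_cons]
    have hp : 0 < 2 ^ t.length := Nat.two_pow_pos _
    simp only [List.length_cons, pow_succ]
    split <;> omega

theorem bval_append (xs ys : List Char) :
    bval (xs ++ ys) = bval xs * 2 ^ ys.length + bval ys := by
  
  have h : bval (xs ++ ys) = List.foldl (fun v c => 2 * v + (if c ≠ '0' then 1 else 0)) (bval xs) ys := by
    rw [bval, List.foldl_append]; rfl
  rw [h, foldl_bval]

theorem bval_replicate_zero (m : Nat) : bval (List.replicate m '0') = 0 := by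
  
  induction m with
  | zero => simp [bval]
  | succ k ih => rw [List.replicate_succ, bval_cons]; simp [ih]

theorem bval_replicate_one (m : Nat) : bval (List.replicate m '1') = 2 ^ m - 1 := by
  
  induction m with
  | zero => simp [bval]
  | succ k ih =>
    rw [List.replicate_succ, bval_cons, ih]
    have hp : 0 < 2 ^ k := Nat.two_pow_pos _
    simp [pow_succ]
    omega

theorem pvInv_length (l : List Char) : (pvInv l).length = l.length := by
  
  induction l with
  | nil => rfl
  | cons c t ih => simp [pvInv, ih]

theorem pvInv_binary (l : List Char) : ∀ c ∈ pvInv l, c = '0' ∨ c = '1' := by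
  
  induction l with
  | nil => simp [pvInv]
  | cons c t ih =>
    intro d hd
    simp only [pvInv, List.mem_cons] at hd
    rcases hd with h | h
    · split at h <;> simp [h]
    · exact ih d h

theorem bval_pvInv (l : List Char) : bval (pvInv l) = 2 ^ l.length - 1 - bval l := by
  
  induction l with
  | nil => simp [pvInv, bval]
  | cons c t ih =>
    simp only [pvInv, List.length_cons]
    rw [bval_cons, bval_cons, ih, pvInv_length]
    have hp : 0 < 2 ^ t.length := Nat.two_pow_pos _
    have hv : bval t < 2 ^ t.length := bval_lt t
    by_cases hc : c = '0' <;> simp [hc, pow_succ] <;> omega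

theorem val_map_eq (l : List Char) (a : Nat) :
    (l.map (fun c => if c = '0' then '0' else '1')).foldl
      (fun v c => 2 * v + (if c = '1' then 1 else 0)) a =
    l.foldl (fun v c => 2 * v + (if c ≠ '0' then 1 else 0)) a := by
  induction l generalizing a with
  | nil => rfl
  | cons c t ih =>
    simp only [List.map_cons, List.foldl_cons]
    by_cases hc : c = '0' <;> simp [hc, ih]

theorem pvBin_binary : ∀ x : Nat, ∀ d ∈ pvBin x, d = '0' ∨ d = '1' := by
  intro x
  induction x using Nat.strong_induction_on with
  | _ x ih =>
    match x with
    | 0 => simp [pvBin]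
    | x + 1 =>
      intro d hd
      rw [pvBin] at hd
      rcases List.mem_append.mp hd with h | h
      · exact ih ((x + 1) / 2) (by omega) d h
      · rw [List.mem_singleton] at h
        subst h; split <;> simp

theorem bval_pvBin : ∀ x : Nat, bval (pvBin x) = x := by
  intro x
  induction x using Nat.strong_induction_on with
  | _ x ih =>
    match x with
    | 0 => simp [pvBin, bval]
    | x + 1 =>
      rw [pvBin, bval_append, ih ((x + 1) / 2) (by omega)]
      have hb : bval [if (x + 1) % 2 = 1 then '1' else '0'] = (x + 1) % 2 := by
        rcases Nat.mod_two_eq_zero_or_one (x + 1) with h | h <;> simp [h, bval]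
      rw [hb]
      simp only [List.length_singleton, pow_one]
      omega

theorem pvBin_length_le : ∀ x n : Nat, x < 2 ^ n → (pvBin x).length ≤ n := by
  intro x
  induction x using Nat.strong_induction_on with
  | _ x ih =>
    match x with
    | 0 => intro n _; simp [pvBin]
    | x + 1 =>
      intro n h
      match n with
      | 0 => simp at h
      | m + 1 =>
        rw [pvBin]
        have hps : (2 : ℕ) ^ (m + 1) = 2 * 2 ^ m := by rw [pow_succ]; ring
        have := ih ((x + 1) / 2) (by omega) m (by omega)
        simp only [List.length_append, List.length_singleton]
        omega

theorem bval_pos_of_mem (l : List Char) (c : Char) (hc : c ∈ l) (h0 : c ≠ '0') :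
    1 ≤ bval l := by
  
  obtain ⟨s, t, rfl⟩ := List.append_of_mem hc
  rw [bval_append, bval_cons]
  have hp : 0 < 2 ^ t.length := Nat.two_pow_pos _
  simp [h0]
  omega

-- two binary char lists of equal length and equal value are equal
theorem binary_ext (l1 l2 : List Char)
    (h1 : ∀ c ∈ l1, c = '0' ∨ c = '1') (h2 : ∀ c ∈ l2, c = '0' ∨ c = '1')
    (hlen : l1.length = l2.length) (hval : bval l1 = bval l2) : l1 = l2 := by
  induction l1 generalizing l2 h2 with
  | nil =>
    cases l2 with
    | nil => rfl
    | cons c2 t2 => simp at hlen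
  | cons c1 t1 ih =>
    cases l2 with
    | nil => simp at hlen
    | cons c2 t2 =>
      simp only [List.length_cons, Nat.succ_inj] at hlen
      rw [bval_cons, bval_cons, hlen] at hval
      have hv1 : bval t1 < 2 ^ t2.length := hlen ▸ bval_lt t1
      have hv2 : bval t2 < 2 ^ t2.length := bval_lt t2
      have hp : 0 < 2 ^ t2.length := Nat.two_pow_pos _
      have hc1 := h1 c1 (List.mem_cons_self ..)
      have hc2 := h2 c2 (List.mem_cons_self ..)
      have hcc : c1 = c2 ∧ bval t1 = bval t2 := by
        rcases hc1 with h | h <;> rcases hc2 with h' | h' <;>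
          subst h <;> subst h' <;> simp_all
        omega
      rw [hcc.1]
      rw [ih t2 (fun c hc => h1 c (List.mem_cons_of_mem _ hc))
        (fun c hc => h2 c (List.mem_cons_of_mem _ hc)) hlen hcc.2]

theorem pvScan_spec (flash : List Char) (hbin : ∀ c ∈ flash, c = '0' ∨ c = '1') :
    ∀ k, k < flash.length → (∃ j, j ≤ k ∧ flash.getD j '0' = '0') →
      pvScan flash k ≤ k ∧ flash.getD (pvScan flash k) '0' = '0' ∧
      ∀ j, pvScan flash k < j → j ≤ k → flash.getD j '0' = '1' := by
  
  intro k
  induction k with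
  | zero =>
    intro _ hex
    obtain ⟨j, hj, h0⟩ := hex
    interval_cases j
    exact ⟨Nat.le_refl _, h0, fun j h1 h2 => absurd (Nat.lt_of_lt_of_le h1 h2) (Nat.lt_irrefl _)⟩
  | succ k ih =>
    intro hk hex
    simp only [pvScan]
    by_cases h1 : flash.getD (k + 1) '0' = '1'
    · rw [if_pos h1]
      have hex' : ∃ j, j ≤ k ∧ flash.getD j '0' = '0' := by
        obtain ⟨j, hj, h0⟩ := hex
        refine ⟨j, ?_, h0⟩
        rcases Nat.lt_or_ge j (k + 1) with h | h
        · omega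
        · exfalso; have : j = k + 1 := by omega
          rw [this, h1] at h0; exact absurd h0 (by decide)
      obtain ⟨ha, hb, hc⟩ := ih (by omega) hex'
      refine ⟨by omega, hb, fun j hja hjb => ?_⟩
      rcases Nat.lt_or_ge j (k + 1) with h | h
      · exact hc j hja (by omega)
      · have : j = k + 1 := by omega
        rw [this]; exact h1
    · rw [if_neg h1]
      have hmem : flash.getD (k + 1) '0' ∈ flash := by
        rw [List.getD_eq_getElem _ _ hk]; exact List.getElem_mem _
      have := hbin _ hmem
      have h0 : flash.getD (k + 1) '0' = '0' := by
        rcases this with h | h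
        · exact h
        · exact absurd h h1
      exact ⟨Nat.le_refl _, h0, fun j hja hjb => by omega⟩

theorem zero_mem_pvInv (l : List Char) (c : Char) (hc : c ∈ l) (h0 : c ≠ '0') :
    '0' ∈ pvInv l := by
  induction l with
  | nil => simp at hc
  | cons d t ih =>
    rcases List.mem_cons.mp hc with rfl | h
    · simp only [pvInv, List.mem_cons]
      left; rw [if_neg h0]
    · simp only [pvInv, List.mem_cons]
      exact Or.inr (ih h)

-- ===== VERDICT (by name: the statement is the Claim_ definition above) =====
theorem original_code_2_complement_spec : Claim_equal_original_code_2_complement := by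
  unfold Claim_equal_original_code_2_complement
  intro s _ hpre
  unfold Spec_original_code_2_complement
  obtain ⟨hne, hcase⟩ := hpre
  unfold original_code_2_complement original_code_2_complement_alt
  cases hl : s.toList with
  | nil => exact absurd hl hne
  | cons c rest =>
    rw [hl] at hcase
    by_cases hc : c = '0'
    · simp [hc]
    · simp only [if_neg hc]
      have hex : ∃ c' ∈ rest, c' ≠ '0' := by
        rcases hcase with h | h
        · exact absurd (by simpa using h) hc
        · simpa [List.any_eq_true] using h
      obtain ⟨w, hw, hw0⟩ := hex
      have hval_def : (rest.map (fun c => if c = '0' then '0' else '1')).foldl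
          (fun v c => 2 * v + (if c = '1' then 1 else 0)) 0 = bval rest := val_map_eq rest 0
      rw [hval_def]
      set n := rest.length with hn
      set flash := '1' :: pvInv rest with hflash
      have hflen : flash.length = n + 1 := by simp [hflash, pvInv_length]; omega
      have hsub : flash.length - 1 = n := by omega
      rw [hsub]
      set i := pvScan flash n with hi
      have hbin : ∀ ch ∈ flash, ch = '0' ∨ ch = '1' := by
        intro ch hch
        rcases List.mem_cons.mp hch with rfl | h
        · right; rfl
        · exact pvInv_binary rest ch h
      obtain ⟨idx, hidx, hidx0⟩ := List.mem_iff_getElem.mp (zero_mem_pvInv rest w hw hw0)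
      rw [pvInv_length] at hidx
      have hwit : ∃ j, j ≤ n ∧ flash.getD j '0' = '0' := by
        refine ⟨idx + 1, by omega, ?_⟩
        rw [List.getD_eq_getElem _ _ (by omega)]
        simpa [hflash] using hidx0
      obtain ⟨hile, hi0, hiall⟩ := pvScan_spec flash hbin n (by omega) hwit
      set m := n - i with hm
      have hrep : flash.length - i - 1 = m := by omega
      rw [hrep]
      -- numeric facts
      have hvlt : bval rest < 2 ^ n := bval_lt rest
      have hvpos : 1 ≤ bval rest := bval_pos_of_mem rest w hw hw0
      have hp2m := Nat.two_pow_pos m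
      have hp2n := Nat.two_pow_pos n
      have hps : (2 : ℕ) ^ (n + 1) = 2 * 2 ^ n := by rw [pow_succ]; ring
      -- B side
      have hx0 : 2 ^ n - bval rest ≠ 0 := by omega
      have hfd : pvFormatBin n (2 ^ n - bval rest) =
          List.replicate (n - (pvBin (2 ^ n - bval rest)).length) '0' ++
            pvBin (2 ^ n - bval rest) := by
        rw [pvFormatBin]
        simp [hx0]
      have hdlen : (pvBin (2 ^ n - bval rest)).length ≤ n :=
        pvBin_length_le _ n (by omega)
      have hBlen : ('1' :: pvFormatBin n (2 ^ n - bval rest)).length = n + 1 := by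
        rw [hfd]; simp; omega
      have hBbin : ∀ ch ∈ ('1' :: pvFormatBin n (2 ^ n - bval rest)), ch = '0' ∨ ch = '1' := by
        intro ch hch
        rcases List.mem_cons.mp hch with rfl | h
        · right; rfl
        · rw [hfd] at h
          rcases List.mem_append.mp h with h' | h'
          · left; exact List.eq_of_mem_replicate h'
          · exact pvBin_binary _ ch h'
      have hBval : bval ('1' :: pvFormatBin n (2 ^ n - bval rest)) = 2 ^ (n + 1) - bval rest := by
        rw [bval_cons, hfd, bval_append, bval_replicate_zero, bval_pvBin]
        have h11 : (if ('1' : Char) ≠ '0' then 1 else 0) = 1 := by decide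
        rw [h11]
        have hfl : (List.replicate (n - (pvBin (2 ^ n - bval rest)).length) '0' ++
            pvBin (2 ^ n - bval rest)).length = n := by simp; omega
        rw [hfl]
        omega
      -- A side: decompose flash around index i
      have higet : flash[i]'(by omega) = '0' := by
        have h := hi0
        rwa [List.getD_eq_getElem _ _ (by omega)] at h
      have hidrop : flash.drop (i + 1) = List.replicate m '1' := by
        refine List.eq_replicate_iff.mpr ⟨by simp [hflen]; omega, ?_⟩
        intro b hb
        obtain ⟨j, hj, hbj⟩ := List.mem_iff_getElem.mp hb
        rw [List.getElem_drop] at hbj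
        rw [List.length_drop, hflen] at hj
        have h1 := hiall (i + 1 + j) (by omega) (by omega)
        rw [List.getD_eq_getElem _ _ (by omega)] at h1
        rw [← hbj]
        exact h1
      have hsplit : flash = flash.take i ++ '0' :: List.replicate m '1' := by
        conv_lhs => rw [← List.take_append_drop i flash]
        congr 1
        rw [List.drop_eq_getElem_cons (by omega : i < flash.length), higet, hidrop]
      have htklen : (flash.take i).length = i := by
        simp [hflen]; omega
      have htkbin : ∀ ch ∈ flash.take i, ch = '0' ∨ ch = '1' :=
        fun ch hch => hbin ch (List.take_subset _ _ hch)
      have hAlen : (flash.take i ++ '1' :: List.replicate m '0').length = n + 1 := by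
        simp [htklen]; omega
      have hAbin : ∀ ch ∈ flash.take i ++ '1' :: List.replicate m '0', ch = '0' ∨ ch = '1' := by
        intro ch hch
        rcases List.mem_append.mp hch with h | h
        · exact htkbin ch h
        · rcases List.mem_cons.mp h with rfl | h'
          · right; rfl
          · left; exact List.eq_of_mem_replicate h'
      have h1 : bval flash = bval (flash.take i) * 2 ^ (m + 1) + (2 ^ m - 1) := by
        conv_lhs => rw [hsplit]
        rw [bval_append, bval_cons, bval_replicate_one]
        simp [List.length_replicate, pow_succ]
      have h2 : bval flash = 2 ^ (n + 1) - 1 - bval rest := by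
        rw [hflash, bval_cons, bval_pvInv, pvInv_length]
        have hone : (if ('1' : Char) ≠ '0' then 1 else 0) = 1 := by decide
        rw [hone, one_mul]
        simp only [← hn]
        omega
      have hAval : bval (flash.take i ++ '1' :: List.replicate m '0') =
          2 ^ (n + 1) - bval rest := by
        rw [bval_append, bval_cons, bval_replicate_zero]
        have hlen1 : ('1' :: List.replicate m '0').length = m + 1 := by simp
        rw [hlen1]
        have : (if ('1' : Char) ≠ '0' then 1 else 0) = 1 := by decide
        rw [this]
        simp only [List.length_replicate, one_mul]
        omega
      exact congrArg String.mk
        (binary_ext _ _ hAbin hBbin (by rw [hAlen, hBlen]) (by rw [hAval, hBval]))
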